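-- pv_equiv track=rewrite | github.com/24alphate/Hackathon-unamed | backend/app/esco_taxonomy.py | normalize_skill_name
-- ===== SOURCE A (Python) =====
-- _ALIASES = {
--     "Frontend API Consumption": ["api integration", "api consumption", "frontend api consumption"],
--     "Async Data Rendering": ["async rendering", "asynchronous rendering", "loading states"],
--     "Form Validation": ["form handling", "input validation", "form submission"],
--     "Responsive UI Design": ["responsive design", "mobile-first design", "responsive layout"],
--     "Component Structure": ["component architecture", "component composition", "ui components"],
--     "Dashboard Layout and Navigation": ["dashboard navigation", "dashboard layout"],
--     "Deployment Literacy": ["deployment", "hosting", "release basics"],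
-- }
--
-- def normalize_skill_name(name: str) -> str:
--     q = (name or "").strip().lower()
--     if not q:
--         return name
--     for canonical, aliases in _ALIASES.items():
--         if q == canonical.lower() or q in aliases:
--             return canonical
--     return name
-- ===== SOURCE B (Python) =====
-- _ALIASES = {
--     "Frontend API Consumption": ["api integration", "api consumption", "frontend api consumption"],
--     "Async Data Rendering": ["async rendering", "asynchronous rendering", "loading states"],
--     "Form Validation": ["form handling", "input validation", "form submission"],
--     "Responsive UI Design": ["responsive design", "mobile-first design", "responsive layout"],
--     "Component Structure": ["component architecture", "component composition", "ui components"],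
--     "Dashboard Layout and Navigation": ["dashboard navigation", "dashboard layout"],
--     "Deployment Literacy": ["deployment", "hosting", "release basics"],
-- }
--
-- # One-time reverse index: every alias and every canonical.lower() maps to its canonical.
-- # setdefault preserves A's first-match precedence.
-- _REVERSE = {}
-- for _canonical, _alias_list in _ALIASES.items():
--     _REVERSE.setdefault(_canonical.lower(), _canonical)
--     for _a in _alias_list:
--         _REVERSE.setdefault(_a, _canonical)
--
-- def normalize_skill_name(name: str) -> str:
--     q = (name or "").strip().lower()
--     if not q:
--         return name
--     return _REVERSE.get(q, name)
-- ===== Notes on version B (the rewrite author's own statement) =====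
-- stated objective: simpler
-- what changed: The per-call scan over all alias entries is replaced by a reverse dict built once at module load (alias/lowercased-canonical -> canonical); the function body becomes a single dict lookup.
import Mathlib
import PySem

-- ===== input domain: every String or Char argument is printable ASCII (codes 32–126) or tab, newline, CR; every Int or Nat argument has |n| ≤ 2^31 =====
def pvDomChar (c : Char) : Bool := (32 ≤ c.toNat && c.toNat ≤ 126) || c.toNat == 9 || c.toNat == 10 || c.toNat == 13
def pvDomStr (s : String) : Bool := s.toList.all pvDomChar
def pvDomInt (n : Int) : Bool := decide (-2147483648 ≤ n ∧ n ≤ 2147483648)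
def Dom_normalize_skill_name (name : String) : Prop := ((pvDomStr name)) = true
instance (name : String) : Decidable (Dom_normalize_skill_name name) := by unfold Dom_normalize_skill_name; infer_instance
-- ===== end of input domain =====

-- B replaces A's per-call scan over the alias table by a reverse index built once
-- (alias / lowercased canonical -> canonical), making the function a single lookup. (objective: simpler)

-- ===== PORT A =====
-- the module constant _ALIASES (shared data; both Pythons define the same literal)
def pvAliases : List (String × List String) :=
  [ ("Frontend API Consumption", ["api integration", "api consumption", "frontend api consumption"]),
    ("Async Data Rendering", ["async rendering", "asynchronous rendering", "loading states"]),
    ("Form Validation", ["form handling", "input validation", "form submission"]),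
    ("Responsive UI Design", ["responsive design", "mobile-first design", "responsive layout"]),
    ("Component Structure", ["component architecture", "component composition", "ui components"]),
    ("Dashboard Layout and Navigation", ["dashboard navigation", "dashboard layout"]),
    ("Deployment Literacy", ["deployment", "hosting", "release basics"]) ]

-- A's for-loop with early return: first entry whose lowered canonical equals q or whose alias list contains q
def pvScan (q : String) : List (String × List String) → Option String
  | [] => none
  | (c, al) :: rest => if q = PySem.Str.lower c ∨ q ∈ al then some c else pvScan q rest

def normalize_skill_name (name : String) : String :=
  let q := PySem.Str.lower (PySem.Str.strip (if name = "" then "" else name))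
  if q = "" then name
  else
    match pvScan q pvAliases with
    | some c => c
    | none => name

-- ===== PORT B =====
-- module-load reverse index: for each entry, setdefault canonical.lower(), then each alias
def pvReverse : PySem.Dict String String :=
  pvAliases.foldl
    (fun d p => p.2.foldl (fun d a => d.setdefault a p.1) (d.setdefault (PySem.Str.lower p.1) p.1))
    PySem.Dict.empty

def normalize_skill_name_alt (name : String) : String :=
  let q := PySem.Str.lower (PySem.Str.strip (if name = "" then "" else name))
  if q = "" then name
  else pvReverse.getD q name

-- ===== PRECONDITION & SPEC =====
def Spec_normalize_skill_name (name : String) (out : String) : Prop := out = normalize_skill_name_alt name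
instance (name : String) (out : String) : Decidable (Spec_normalize_skill_name name out) := by unfold Spec_normalize_skill_name; infer_instance

-- ===== CLAIM (what is proved, stated in full; the proofs are below) =====
def Claim_equal_normalize_skill_name : Prop := ∀ (name : String), Dom_normalize_skill_name name → Spec_normalize_skill_name name (normalize_skill_name name)

-- ===== LEMMAS AND PROOFS =====

-- first-match flattening of the alias table: (lowered canonical, canonical) then (alias, canonical) pairs, in order
def pvFlat : List (String × List String) → List (String × String)
  | [] => []
  | (c, al) :: rest => (PySem.Str.lower c, c) :: (al.map (fun a => (a, c)) ++ pvFlat rest)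

lemma pvLookup_map_append (al : List String) (c : String) (rest : List (String × String)) (q : String) :
    (PySem.Dict.mk (al.map (fun a => (a, c)) ++ rest)).get? q
      = if q ∈ al then some c else (PySem.Dict.mk rest).get? q := by
  induction al with
  | nil => simp
  | cons x xs ih =>
    simp only [List.map_cons, List.cons_append, PySem.Dict.get?_mk_cons, ih, List.mem_cons]
    by_cases hx : q = x
    · simp [hx]
    · simp [hx, Ne.symm hx]

lemma pvScan_eq_flat_lookup (entries : List (String × List String)) (q : String) :
    pvScan q entries = (PySem.Dict.mk (pvFlat entries)).get? q := by
  induction entries with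
  | nil => simp [pvScan, pvFlat, PySem.Dict.get?]
  | cons p rest ih =>
    obtain ⟨c, al⟩ := p
    simp only [pvScan, pvFlat, PySem.Dict.get?_mk_cons, pvLookup_map_append, ih]
    by_cases h1 : q = PySem.Str.lower c
    · simp [h1]
    · by_cases h2 : q ∈ al <;> simp [h1, h2, Ne.symm h1]

-- the built reverse dict answers every lookup like first-match over the flattened table
set_option maxRecDepth 8192 in
lemma pvReverse_get? (q : String) :
    pvReverse.get? q = (PySem.Dict.mk (pvFlat pvAliases)).get? q := by
  by_cases hq : q ∈ pvReverse.keys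
  · have hk : pvReverse.keys =
      ["frontend api consumption", "api integration", "api consumption", "async data rendering",
       "async rendering", "asynchronous rendering", "loading states", "form validation",
       "form handling", "input validation", "form submission", "responsive ui design",
       "responsive design", "mobile-first design", "responsive layout", "component structure",
       "component architecture", "component composition", "ui components",
       "dashboard layout and navigation", "dashboard navigation", "dashboard layout",
       "deployment literacy", "deployment", "hosting", "release basics"] := by decide
    rw [hk] at hq
    fin_cases hq <;> decide
  · have hsub : (PySem.Dict.mk (pvFlat pvAliases)).keys ⊆ pvReverse.keys := by decide
    rw [(PySem.Dict.get?_eq_none_iff_not_mem_keys _ _).mpr hq,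
        (PySem.Dict.get?_eq_none_iff_not_mem_keys _ _).mpr (fun h => hq (hsub h))]

theorem normalize_skill_name_spec : Claim_equal_normalize_skill_name := by
  intro name _
  unfold Spec_normalize_skill_name normalize_skill_name normalize_skill_name_alt
  set q := PySem.Str.lower (PySem.Str.strip (if name = "" then "" else name)) with hq
  by_cases h : q = ""
  · simp [h]
  · simp only [if_neg h]
    rw [pvScan_eq_flat_lookup, ← pvReverse_get?, PySem.Dict.getD_eq_get?_getD]
    cases pvReverse.get? q <;> rfl
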